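-- pv_equiv track=rewrite | github.com/destyjustc/account_ocr | backend/ai/OCRtest.py | findColumns
-- ===== SOURCE A (Python) =====
-- def findColumns(hist, gap = 10):
--     listOfColumns = []
--     start = -1
--     countZeros = 0
--     left_pos = [0]
--     for i in range(len(hist) - 1):
--         if hist[i] == 0:
--             countZeros += 1
--         if hist[i] > 0 and (countZeros > gap or start == -1):
--             start = i
--             countZeros = 0
--             if start - gap//2 > left_pos[-1]:
--                 left_pos.append(start - gap//2)
--     left_pos.append(len(hist))
--     for i in range(len(left_pos) - 1):
--         if left_pos[i+1] - left_pos[i] > 20: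
--             listOfColumns.append((left_pos[i], left_pos[i+1]))
--
--     return listOfColumns
-- ===== SOURCE B (Python) =====
-- def findColumns(hist, gap = 10):
--     # One pass: emit each column as soon as its right boundary is known,
--     # instead of collecting all boundaries first and re-scanning them.
--     out = []
--     prev = 0
--     start = -1
--     countZeros = 0
--     for i in range(len(hist) - 1):
--         h = hist[i]
--         if h == 0:
--             countZeros += 1
--         elif h > 0 and (countZeros > gap or start == -1):
--             cand = i - gap // 2
--             if cand > prev:
--                 if cand - prev > 20:
--                     out.append((prev, cand))
--                 prev = cand
--             start = i
--             countZeros = 0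
--     if len(hist) - prev > 20:
--         out.append((prev, len(hist)))
--     return out
-- ===== Notes on version B (the rewrite author's own statement) =====
-- stated objective: simpler
-- what changed: A collects all column boundaries into left_pos and then re-scans adjacent boundary pairs in a second indexed loop; B fuses this into a single pass over hist that keeps only the previous boundary and emits each (prev, cand) column the moment its right boundary is detected, closing the last column against len(hist) after the loop.
import Mathlib
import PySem

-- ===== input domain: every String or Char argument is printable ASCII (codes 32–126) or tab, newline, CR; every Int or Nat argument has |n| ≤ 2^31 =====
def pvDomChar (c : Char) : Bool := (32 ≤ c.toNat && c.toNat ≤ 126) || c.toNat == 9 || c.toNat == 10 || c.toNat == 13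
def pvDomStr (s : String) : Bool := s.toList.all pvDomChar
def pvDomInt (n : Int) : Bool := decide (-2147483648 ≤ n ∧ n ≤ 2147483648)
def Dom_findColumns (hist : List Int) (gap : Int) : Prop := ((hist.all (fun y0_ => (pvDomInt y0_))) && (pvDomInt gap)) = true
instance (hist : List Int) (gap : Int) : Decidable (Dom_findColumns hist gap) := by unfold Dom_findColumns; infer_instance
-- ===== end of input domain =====

-- B fuses A's two passes into one: it emits each column as soon as its right boundary
-- is detected, instead of collecting all boundaries first and re-scanning them (objective: simpler).


-- ===== PORT A =====
-- one iteration of A's first loop; state = (start, countZeros, left_pos)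
def fcStepA (hist : List Int) (gap : Int) (st : Int × Int × List Int) (i : Int) : Int × Int × List Int :=
  let start := st.1
  let countZeros := if PySem.List.pyGetD hist i 0 = 0 then st.2.1 + 1 else st.2.1
  let left_pos := st.2.2
  if PySem.List.pyGetD hist i 0 > 0 ∧ (countZeros > gap ∨ start = -1) then
    let start := i
    (start, 0,
      if start - PySem.Int.floordiv gap 2 > PySem.List.pyGetD left_pos (-1) 0 then
        left_pos ++ [start - PySem.Int.floordiv gap 2]
      else left_pos)
  else (start, countZeros, left_pos)


def findColumns (hist : List Int) (gap : Int) : List (Int × Int) :=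
  let st := (PySem.List.pyRange 0 ((hist.length : Int) - 1) 1).foldl (fcStepA hist gap) (-1, 0, [0])
  let left_pos := st.2.2 ++ [(hist.length : Int)]
  (PySem.List.pyRange 0 ((left_pos.length : Int) - 1) 1).foldl
    (fun acc i =>
      if PySem.List.pyGetD left_pos (i + 1) 0 - PySem.List.pyGetD left_pos i 0 > 20 then
        acc ++ [(PySem.List.pyGetD left_pos i 0, PySem.List.pyGetD left_pos (i + 1) 0)]
      else acc) []

-- ===== PORT B =====
-- one iteration of B's single loop; state = (out, prev, start, countZeros)
def fcStepB (hist : List Int) (gap : Int) (st : List (Int × Int) × Int × Int × Int) (i : Int) :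
    List (Int × Int) × Int × Int × Int :=
  let out := st.1
  let prev := st.2.1
  let start := st.2.2.1
  let countZeros := st.2.2.2
  let h := PySem.List.pyGetD hist i 0
  if h = 0 then (out, prev, start, countZeros + 1)
  else if h > 0 ∧ (countZeros > gap ∨ start = -1) then
    let cand := i - PySem.Int.floordiv gap 2
    if cand > prev then
      ((if cand - prev > 20 then out ++ [(prev, cand)] else out), cand, i, 0)
    else (out, prev, i, 0)
  else (out, prev, start, countZeros)


def findColumns_alt (hist : List Int) (gap : Int) : List (Int × Int) :=
  let st := (PySem.List.pyRange 0 ((hist.length : Int) - 1) 1).foldl (fcStepB hist gap) ([], 0, -1, 0)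
  if (hist.length : Int) - st.2.1 > 20 then st.1 ++ [(st.2.1, (hist.length : Int))] else st.1

-- ===== PRECONDITION & SPEC =====
def Spec_findColumns (hist : List Int) (gap : Int) (out : List (Int × Int)) : Prop := out = findColumns_alt hist gap
instance (hist : List Int) (gap : Int) (out : List (Int × Int)) : Decidable (Spec_findColumns hist gap out) := by unfold Spec_findColumns; infer_instance

-- ===== CLAIM (what is proved, stated in full; the proofs are below) =====
def Claim_equal_findColumns : Prop := ∀ (hist : List Int) (gap : Int), Dom_findColumns hist gap → Spec_findColumns hist gap (findColumns hist gap)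

-- ===== LEMMAS AND PROOFS =====

-- the columns A's second loop extracts from a boundary list: adjacent pairs of width > 20
def pairScan : List Int → List (Int × Int)
  | a :: b :: rest => (if b - a > 20 then [(a, b)] else []) ++ pairScan (b :: rest)
  | _ => []

theorem pyGetD_neg_one (l : List Int) (d : Int) (h : l ≠ []) :
    PySem.List.pyGetD l (-1) d = l.getLastD 0 := by
  cases l with
  | nil => simp at h
  | cons a t =>
    simp [PySem.List.pyGetD, PySem.List.pyGet?, PySem.List.pyIdx?,
      List.getLast?_eq_getElem?]

theorem pairScan_append (l : List Int) (x : Int) (h : l ≠ []) :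
    pairScan (l ++ [x]) =
      pairScan l ++ (if x - l.getLastD 0 > 20 then [(l.getLastD 0, x)] else []) := by
  induction l with
  | nil => simp at h
  | cons a t ih =>
    cases t with
    | nil => simp [pairScan]
    | cons b r =>
      have := ih (by simp)
      simp only [List.cons_append, pairScan] at this ⊢
      rw [this]
      simp [List.getLastD]

theorem foldl_pairs_nat (t : List Int) : ∀ (a : Int) (acc : List (Int × Int)),
    (List.range t.length).foldl
      (fun acc k => if (a :: t).getD (k+1) 0 - (a :: t).getD k 0 > 20 then
          acc ++ [((a :: t).getD k 0, (a :: t).getD (k+1) 0)] else acc) acc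
      = acc ++ pairScan (a :: t) := by
  induction t with
  | nil => intro a acc; simp [pairScan]
  | cons b r ih =>
    intro a acc
    rw [List.length_cons, List.range_succ_eq_map]
    simp only [List.foldl_cons, List.foldl_map, List.getD_cons_succ, List.getD_cons_zero,
      Nat.succ_eq_add_one]
    have ihb := ih b
    simp only [List.getD_cons_succ] at ihb
    rw [ihb]
    simp only [pairScan]
    split <;> simp

theorem foldl_pairs_eq_pairScan (l : List Int) :
    (PySem.List.pyRange 0 ((l.length : Int) - 1) 1).foldl
      (fun acc i =>
        if PySem.List.pyGetD l (i + 1) 0 - PySem.List.pyGetD l i 0 > 20 then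
          acc ++ [(PySem.List.pyGetD l i 0, PySem.List.pyGetD l (i + 1) 0)]
        else acc) [] = pairScan l := by
  cases l with
  | nil => simp [PySem.List.pyRange_one_eq_nil, pairScan]
  | cons a t =>
    have hb : ((a :: t).length : Int) - 1 = (t.length : Nat) := by simp
    rw [hb, PySem.List.pyRange_zero_natCast, List.foldl_map]
    have : ∀ (acc : List (Int × Int)) (k : Nat),
        (fun acc (k : Nat) =>
          if PySem.List.pyGetD (a :: t) ((k : Int) + 1) 0 - PySem.List.pyGetD (a :: t) (k : Int) 0 > 20 then
            acc ++ [(PySem.List.pyGetD (a :: t) (k : Int) 0, PySem.List.pyGetD (a :: t) ((k : Int) + 1) 0)]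
          else acc) acc k
        = (fun acc k => if (a :: t).getD (k+1) 0 - (a :: t).getD k 0 > 20 then
            acc ++ [((a :: t).getD k 0, (a :: t).getD (k+1) 0)] else acc) acc k := by
      intro acc k
      have h1 : ((k : Int) + 1) = ((k + 1 : Nat) : Int) := by push_cast; ring
      simp only [h1, PySem.List.pyGetD_natCast]
    rw [funext fun acc => funext (this acc)]
    exact foldl_pairs_nat t a []

theorem fold_invariant (hist : List Int) (gap : Int) (idxs : List Int) :
    ∀ (start cz : Int) (lp : List Int),
      lp ≠ [] →
      (idxs.foldl (fcStepB hist gap) (pairScan lp, lp.getLastD 0, start, cz)) =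
        (pairScan (idxs.foldl (fcStepA hist gap) (start, cz, lp)).2.2,
         ((idxs.foldl (fcStepA hist gap) (start, cz, lp)).2.2).getLastD 0,
         (idxs.foldl (fcStepA hist gap) (start, cz, lp)).1,
         (idxs.foldl (fcStepA hist gap) (start, cz, lp)).2.1) ∧
      (idxs.foldl (fcStepA hist gap) (start, cz, lp)).2.2 ≠ [] := by
  induction idxs with
  | nil => intro start cz lp hlp; exact ⟨rfl, hlp⟩
  | cons i rest ih =>
    intro start cz lp hlp
    simp only [List.foldl_cons]
    by_cases h0 : PySem.List.pyGetD hist i 0 = 0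
    · have hA : fcStepA hist gap (start, cz, lp) i = (start, cz + 1, lp) := by
        simp [fcStepA, h0]
      have hB : fcStepB hist gap (pairScan lp, lp.getLastD 0, start, cz) i
          = (pairScan lp, lp.getLastD 0, start, cz + 1) := by
        simp [fcStepB, h0]
      rw [hA, hB]; exact ih start (cz + 1) lp hlp
    · by_cases hc : PySem.List.pyGetD hist i 0 > 0 ∧ (cz > gap ∨ start = -1)
      · by_cases hgt : i - PySem.Int.floordiv gap 2 > lp.getLastD 0
        · have hA : fcStepA hist gap (start, cz, lp) i
              = (i, 0, lp ++ [i - PySem.Int.floordiv gap 2]) := by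
            simp only [fcStepA, if_neg h0, pyGetD_neg_one lp 0 hlp]
            rw [if_pos hc, if_pos hgt]
          have hB : fcStepB hist gap (pairScan lp, lp.getLastD 0, start, cz) i
              = (pairScan (lp ++ [i - PySem.Int.floordiv gap 2]),
                  i - PySem.Int.floordiv gap 2, i, 0) := by
            simp only [fcStepB, if_neg h0]
            rw [if_pos hc, if_pos hgt, pairScan_append lp _ hlp]
            split_ifs <;> simp
          rw [hA, hB]
          have := ih i 0 (lp ++ [i - PySem.Int.floordiv gap 2]) (by simp)
          rwa [show (lp ++ [i - PySem.Int.floordiv gap 2]).getLastD 0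
              = i - PySem.Int.floordiv gap 2 by simp] at this
        · have hA : fcStepA hist gap (start, cz, lp) i = (i, 0, lp) := by
            simp only [fcStepA, if_neg h0, pyGetD_neg_one lp 0 hlp]
            rw [if_pos hc, if_neg hgt]
          have hB : fcStepB hist gap (pairScan lp, lp.getLastD 0, start, cz) i
              = (pairScan lp, lp.getLastD 0, i, 0) := by
            simp only [fcStepB, if_neg h0]
            rw [if_pos hc, if_neg hgt]
          rw [hA, hB]; exact ih i 0 lp hlp
      · have hA : fcStepA hist gap (start, cz, lp) i = (start, cz, lp) := by
          simp only [fcStepA, if_neg h0]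
          rw [if_neg hc]
        have hB : fcStepB hist gap (pairScan lp, lp.getLastD 0, start, cz) i
            = (pairScan lp, lp.getLastD 0, start, cz) := by
          simp only [fcStepB, if_neg h0]
          rw [if_neg hc]
        rw [hA, hB]; exact ih start cz lp hlp

-- ===== VERDICT (by name: the statement is the Claim_ definition above) =====
theorem findColumns_spec : Claim_equal_findColumns := by
  intro hist gap _
  unfold Spec_findColumns findColumns findColumns_alt
  have h := fold_invariant hist gap (PySem.List.pyRange 0 ((hist.length : Int) - 1) 1)
      (-1) 0 [0] (by simp)
  have e : ((pairScan [0], ([0] : List Int).getLastD 0, (-1 : Int), (0 : Int)) :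
      List (Int × Int) × Int × Int × Int) = ([], 0, -1, 0) := rfl
  rw [e] at h
  obtain ⟨h1, h2⟩ := h
  simp only [h1, foldl_pairs_eq_pairScan]
  rw [pairScan_append _ _ h2]
  split_ifs <;> simp
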